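-- pv_equiv track=rewrite | github.com/HyangDan2/LMPilot0003 | src/gui/token_handler.py | handle_token_limits
-- ===== SOURCE A (Python) =====
-- def estimate_token_count(text: str) -> int:
--     """Estimate token usage with a conservative whitespace-based approximation."""
--     return len(text.split())
--
-- def truncate_text_to_token_budget(text: str, max_tokens: int) -> str:
--     """Trim text to the configured approximate token budget while keeping lines."""
--     if max_tokens <= 0:
--         return ""
--
--     remaining = max_tokens
--     kept_lines: list[str] = []
--
--     for line in text.splitlines():
--         words = line.split()
--         if not words:
--             kept_lines.append("")
--             continue
--
--         if len(words) <= remaining: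
--             kept_lines.append(line)
--             remaining -= len(words)
--             continue
--
--         if remaining > 0:
--             leading_space_count = len(line) - len(line.lstrip())
--             kept_lines.append((" " * leading_space_count) + " ".join(words[:remaining]))
--         break
--
--     return "\n".join(kept_lines).rstrip()
--
-- def handle_token_limits(conversation: list[str], max_tokens: int) -> list[str]:
--     """Return the newest conversation turns that fit the approximate token budget."""
--     if max_tokens <= 0:
--         return []
--
--     selected: list[str] = []
--     total_tokens = 0
--
--     for turn in reversed(conversation):
--         turn_tokens = estimate_token_count(turn)
--         remaining_tokens = max_tokens - total_tokens
--         if remaining_tokens <= 0: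
--             break
--
--         if turn_tokens <= remaining_tokens:
--             selected.append(turn)
--             total_tokens += turn_tokens
--         else:
--             selected.append(truncate_text_to_token_budget(turn, remaining_tokens))
--             break
--
--     selected.reverse()
--     return [turn for turn in selected if turn]
-- ===== SOURCE B (Python) =====
-- def _word_count(text: str) -> int:
--     return len(text.split())
--
--
-- def _truncate_to_budget(text: str, budget: int) -> str:
--     """Trim text to the budget: take-while on per-line word counts, then one boundary line."""
--     if budget <= 0:
--         return ""
--     pairs = [(line, line.split()) for line in text.splitlines()]
--     kept = []
--     i = 0
--     while i < len(pairs) and len(pairs[i][1]) <= budget: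
--         line, words = pairs[i]
--         kept.append(line if words else "")
--         budget -= len(words)
--         i += 1
--     if i < len(pairs) and budget > 0:
--         line, words = pairs[i]
--         pad = " " * (len(line) - len(line.lstrip()))
--         kept.append(pad + " ".join(words[:budget]))
--     return "\n".join(kept).rstrip()
--
--
-- def handle_token_limits(conversation: list[str], max_tokens: int) -> list[str]:
--     if max_tokens <= 0:
--         return []
--     n = len(conversation)
--     counts = [_word_count(turn) for turn in conversation]
--     # cumulative token totals of the newest k turns: sums[k] = counts of last k turns
--     sums = [0]
--     for c in reversed(counts):
--         sums.append(sums[-1] + c)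
--     # how many whole newest turns fit, and the tokens they use
--     k, used = 0, 0
--     for total in sums[1:]:
--         if used < max_tokens and total <= max_tokens:
--             k, used = k + 1, total
--         else:
--             break
--     result = conversation[n - k:]
--     leftover = max_tokens - used
--     if leftover > 0 and k < n:
--         result = [_truncate_to_budget(conversation[n - 1 - k], leftover)] + result
--     return [turn for turn in result if turn]
-- ===== Notes on version B (the rewrite author's own statement) =====
-- stated objective: alternative
-- what changed: Replaces A's stateful newest-first scan with break by a counts-then-cumulative-sums decomposition: map turns to word counts, build suffix cumulative sums, read off the cutoff index k and used budget from them, slice the fitting suffix and truncate the single boundary turn; the truncation helper likewise becomes take-while over (line, words) pairs plus one boundary line instead of a three-branch loop with break.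
import Mathlib
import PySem

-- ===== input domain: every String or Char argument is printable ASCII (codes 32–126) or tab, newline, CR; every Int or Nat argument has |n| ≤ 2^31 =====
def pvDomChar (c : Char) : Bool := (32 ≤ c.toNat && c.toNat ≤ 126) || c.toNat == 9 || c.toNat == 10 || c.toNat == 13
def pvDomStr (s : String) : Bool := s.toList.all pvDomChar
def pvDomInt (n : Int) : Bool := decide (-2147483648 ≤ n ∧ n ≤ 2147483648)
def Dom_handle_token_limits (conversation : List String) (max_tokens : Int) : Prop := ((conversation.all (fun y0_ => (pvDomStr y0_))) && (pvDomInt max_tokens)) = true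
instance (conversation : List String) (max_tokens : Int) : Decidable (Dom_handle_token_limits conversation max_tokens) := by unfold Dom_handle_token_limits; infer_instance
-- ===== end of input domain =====

-- B replaces A's stateful reversed scan-with-break by a counts/cumulative-sums decomposition
-- (cutoff index + leftover budget, then slice and one boundary truncation); alternative, not faster.


-- ===== PORT A =====
-- estimate_token_count
def pvEstA (text : String) : Int := ((PySem.Str.split₀ text).length : Int)

-- " " * (len(line) - len(line.lstrip()))  — hand-ported: the count is ≥ 0, and Python's
-- string repetition by a nonnegative int is List.replicate on the code points
def pvPadA (line : String) : String :=
  String.ofList (List.replicate ((PySem.Str.len line) - (PySem.Str.len (PySem.Str.lstrip line))).toNat ' ')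

-- the for-line loop of truncate_text_to_token_budget (break = stop recursing)
def pvLinesA : List String → Int → List String
  | [], _ => []
  | l :: ls, remaining =>
    let words := PySem.Str.split₀ l
    if words = [] then "" :: pvLinesA ls remaining
    else if (words.length : Int) ≤ remaining then l :: pvLinesA ls (remaining - words.length)
    else if 0 < remaining then
      [pvPadA l ++ PySem.Str.join " " (PySem.List.slice words none (some remaining))]
    else []

def pvTruncA (text : String) (max_tokens : Int) : String :=
  if max_tokens ≤ 0 then ""
  else PySem.Str.rstrip (PySem.Str.join "\n" (pvLinesA (PySem.Str.splitlines text) max_tokens))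

-- the for-turn loop of handle_token_limits over reversed(conversation), with accumulator `selected`
def pvLoopA : List String → Int → Int → List String → List String
  | [], _, _, selected => selected
  | t :: ts, maxT, total, selected =>
    let tt := pvEstA t
    let rem := maxT - total
    if rem ≤ 0 then selected
    else if tt ≤ rem then pvLoopA ts maxT (total + tt) (selected ++ [t])
    else selected ++ [pvTruncA t rem]

def handle_token_limits (conversation : List String) (max_tokens : Int) : List String :=
  if max_tokens ≤ 0 then []
  else ((pvLoopA conversation.reverse max_tokens 0 []).reverse).filter (fun t => t != "")

-- ===== PORT B =====
def pvWcB (text : String) : Int := ((PySem.Str.split₀ text).length : Int)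

def pvPadB (line : String) : String :=
  String.ofList (List.replicate ((PySem.Str.len line) - (PySem.Str.len (PySem.Str.lstrip line))).toNat ' ')

-- the while take-while loop of _truncate_to_budget: kept full lines, leftover budget, remaining pairs
def pvLinesB : List (String × List String) → Int → (List String × Int × List (String × List String))
  | [], budget => ([], budget, [])
  | (l, w) :: ps, budget =>
    if (w.length : Int) ≤ budget then
      let r := pvLinesB ps (budget - w.length)
      ((if w = [] then "" else l) :: r.1, r.2)
    else ([], budget, (l, w) :: ps)

def pvTruncB (text : String) (budget : Int) : String :=
  if budget ≤ 0 then ""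
  else
    let pairs := (PySem.Str.splitlines text).map (fun l => (l, PySem.Str.split₀ l))
    let r := pvLinesB pairs budget
    let kept := r.1 ++ (match r.2.2 with
      | [] => []
      | (l, w) :: _ =>
        if 0 < r.2.1 then
          [pvPadB l ++ PySem.Str.join " " (PySem.List.slice w none (some r.2.1))]
        else [])
    PySem.Str.rstrip (PySem.Str.join "\n" kept)

-- sums[1:] built with a running total (sums[-1] is the carried total)
def pvSumsB : List Int → Int → List Int
  | [], _ => []
  | c :: cs, s => (s + c) :: pvSumsB cs (s + c)

-- the for-total loop with break: how many newest turns fit (k) and the tokens they use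
def pvFindB : List Int → Int → Int → Nat × Int
  | [], _, used => (0, used)
  | total :: rest, b, used =>
    if used < b ∧ total ≤ b then
      let r := pvFindB rest b total
      (r.1 + 1, r.2)
    else (0, used)

def handle_token_limits_alt (conversation : List String) (max_tokens : Int) : List String :=
  if max_tokens ≤ 0 then []
  else
    let n := conversation.length
    let counts := conversation.map pvWcB
    let sums := pvSumsB counts.reverse 0
    let ku := pvFindB sums max_tokens 0
    let leftover := max_tokens - ku.2
    let result := conversation.drop (n - ku.1)
    -- conversation[n - 1 - k]: always in range when the branch is taken (k < n); pyGetD is exact there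
    let result := if 0 < leftover ∧ ku.1 < n then
        pvTruncB (PySem.List.pyGetD conversation ((n : Int) - 1 - (ku.1 : Int)) "") leftover :: result
      else result
    result.filter (fun t => t != "")

-- ===== PRECONDITION & SPEC =====
def Spec_handle_token_limits (conversation : List String) (max_tokens : Int) (out : List String) : Prop := out = handle_token_limits_alt conversation max_tokens
instance (conversation : List String) (max_tokens : Int) (out : List String) : Decidable (Spec_handle_token_limits conversation max_tokens out) := by unfold Spec_handle_token_limits; infer_instance

-- ===== CLAIM (what is proved, stated in full; the proofs are below) =====
def Claim_equal_handle_token_limits : Prop := ∀ (conversation : List String) (max_tokens : Int), Dom_handle_token_limits conversation max_tokens → Spec_handle_token_limits conversation max_tokens (handle_token_limits conversation max_tokens)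

-- ===== LEMMAS AND PROOFS =====

-- B's kept-lines triple assembled into the final kept list (the inline expression in pvTruncB)
def pvAssemble (r : List String × Int × List (String × List String)) : List String :=
  r.1 ++ (match r.2.2 with
    | [] => []
    | (l, w) :: _ =>
      if 0 < r.2.1 then
        [pvPadB l ++ PySem.Str.join " " (PySem.List.slice w none (some r.2.1))]
      else [])

theorem assemble_cons (x : String) (r : List String × Int × List (String × List String)) :
    pvAssemble (x :: r.1, r.2) = x :: pvAssemble r := by
  simp [pvAssemble]

-- A's line loop equals B's take-while + boundary, for a nonnegative budget
theorem linesAB : ∀ (ls : List String) (b : Int), 0 ≤ b →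
    pvLinesA ls b = pvAssemble (pvLinesB (ls.map fun l => (l, PySem.Str.split₀ l)) b) := by
  intro ls; induction ls with
  | nil => intro b hb; simp [pvLinesA, pvLinesB, pvAssemble]
  | cons l ls ih =>
    intro b hb
    simp only [pvLinesA, pvLinesB, List.map_cons]
    by_cases hw : PySem.Str.split₀ l = []
    · simp only [hw, List.length_nil, Nat.cast_zero, ite_true, sub_zero]
      rw [if_pos hb, assemble_cons]
      simp [ih b hb]
    · rw [if_neg hw]
      by_cases hlen : ((PySem.Str.split₀ l).length : Int) ≤ b
      · rw [if_pos hlen, if_pos hlen, if_neg hw, assemble_cons]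
        simp [ih (b - (PySem.Str.split₀ l).length) (by omega)]
      · rw [if_neg hlen, if_neg hlen]
        simp [pvAssemble, pvPadA, pvPadB]

-- the two truncation helpers agree
theorem truncAB (text : String) (b : Int) : pvTruncA text b = pvTruncB text b := by
  unfold pvTruncA pvTruncB
  by_cases h : b ≤ 0
  · simp [h]
  · rw [if_neg h, if_neg h, linesAB _ b (by omega)]
    rfl

theorem sums_length : ∀ (cs : List Int) (p : Int), (pvSumsB cs p).length = cs.length := by
  intro cs; induction cs with
  | nil => intro p; rfl
  | cons c cs ih => intro p; simp [pvSumsB, ih]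

theorem find_le_length : ∀ (cs : List Int) (b used : Int), (pvFindB cs b used).1 ≤ cs.length := by
  intro cs; induction cs with
  | nil => intro b u; simp [pvFindB]
  | cons c cs ih =>
    intro b u
    simp only [pvFindB]
    split
    · simpa using Nat.succ_le_succ (ih b c)
    · simp

-- shift: running the cutoff scan with carried total p over sums offset by p
theorem find_shift : ∀ (cs : List Int) (p b : Int),
    pvFindB (pvSumsB cs p) b p =
      ((pvFindB (pvSumsB cs 0) (b - p) 0).1, (pvFindB (pvSumsB cs 0) (b - p) 0).2 + p) := by
  intro cs; induction cs with
  | nil => intro p b; simp [pvSumsB, pvFindB]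
  | cons c cs ih =>
    intro p b
    simp only [pvSumsB, pvFindB, zero_add]
    by_cases h : p < b ∧ p + c ≤ b
    · rw [if_pos h, if_pos (by omega : (0:Int) < b - p ∧ c ≤ b - p)]
      have hd : b - (p + c) = b - p - c := by ring
      simp only [ih (p + c) b, ih c (b - p), hd, Prod.mk.injEq]
      exact ⟨trivial, by ring⟩
    · rw [if_neg h, if_neg (by omega : ¬((0:Int) < b - p ∧ c ≤ b - p))]
      simp

-- B's selection written in A's (reversed) processing order
def pvSel (r : List String) (b : Int) : List String :=
  let ku := pvFindB (pvSumsB (r.map pvWcB) 0) b 0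
  r.take ku.1 ++ (match r.drop ku.1 with
    | [] => []
    | t :: _ => if 0 < b - ku.2 then [pvTruncB t (b - ku.2)] else [])

-- A's turn loop computes exactly B's selection (appended to the accumulator)
theorem loop_eq_sel : ∀ (r : List String) (maxT total : Int) (sel : List String),
    pvLoopA r maxT total sel = sel ++ pvSel r (maxT - total) := by
  intro r; induction r with
  | nil => intro maxT total sel; simp [pvLoopA, pvSel, pvSumsB, pvFindB]
  | cons t ts ih =>
    intro maxT total sel
    simp only [pvLoopA, pvSel, pvSumsB, pvFindB, List.map_cons, zero_add]
    set b := maxT - total with hb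
    by_cases h0 : b ≤ 0
    · rw [if_pos h0, if_neg (by omega : ¬((0:Int) < b ∧ pvWcB t ≤ b))]
      simp
      exact h0
    · rw [if_neg h0]
      by_cases hc : pvEstA t ≤ b
      · rw [if_pos hc, if_pos (by exact ⟨by omega, hc⟩ : (0:Int) < b ∧ pvWcB t ≤ b)]
        have hsh := find_shift (ts.map pvWcB) (pvWcB t) b
        rw [hsh]
        have harg : maxT - (total + pvEstA t) = b - pvWcB t := by simp [hb, pvEstA, pvWcB]; ring
        rw [ih maxT (total + pvEstA t) (sel ++ [t]), harg]
        simp only [pvSel, List.append_assoc, List.take_succ_cons, List.drop_succ_cons,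
          List.cons_append]
        have : b - ((pvFindB (pvSumsB (List.map pvWcB ts) 0) (b - pvWcB t) 0).2 + pvWcB t)
             = b - pvWcB t - (pvFindB (pvSumsB (List.map pvWcB ts) 0) (b - pvWcB t) 0).2 := by ring
        rw [this]
        simp
      · rw [if_neg hc, if_neg (by simp [pvEstA] at hc; simp [pvWcB]; omega : ¬((0:Int) < b ∧ pvWcB t ≤ b))]
        simp [truncAB, lt_of_not_ge (by omega : ¬ b ≤ 0)]

-- reversing B's selection and filtering gives exactly port B's result
theorem sel_reverse (conv : List String) (b : Int) (hb : ¬ b ≤ 0) :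
    ((pvSel conv.reverse b).reverse).filter (fun t => t != "") = handle_token_limits_alt conv b := by
  unfold handle_token_limits_alt
  rw [if_neg hb]
  simp only [pvSel]
  have hmap : (conv.map pvWcB).reverse = conv.reverse.map pvWcB := by simp
  rw [hmap]
  set ku := pvFindB (pvSumsB (conv.reverse.map pvWcB) 0) b 0 with hku
  have hk : ku.1 ≤ conv.length := by
    have := find_le_length (pvSumsB (conv.reverse.map pvWcB) 0) b 0
    rw [← hku, sums_length] at this
    simpa using this
  congr 1
  have htake : (conv.reverse.take ku.1).reverse = conv.drop (conv.length - ku.1) := by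
    rw [List.take_reverse]; simp
  by_cases hcase : 0 < b - ku.2 ∧ ku.1 < conv.length
  · rw [if_pos hcase]
    have hk' : ku.1 < conv.reverse.length := by simpa using hcase.2
    rw [List.drop_eq_getElem_cons hk']
    rw [show (match conv.reverse[ku.1]'hk' :: List.drop (ku.1+1) conv.reverse with
        | [] => ([] : List String)
        | t :: _ => if 0 < b - ku.2 then [pvTruncB t (b - ku.2)] else [])
      = if 0 < b - ku.2 then [pvTruncB (conv.reverse[ku.1]'hk') (b - ku.2)] else [] from rfl]
    rw [if_pos hcase.1]
    have hidx : ((conv.length : Int) - 1 - (ku.1 : Int)) = ((conv.length - 1 - ku.1 : Nat) : Int) := by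
      have := hcase.2; omega
    rw [hidx]
    have hget : PySem.List.pyGetD conv ((conv.length - 1 - ku.1 : Nat) : Int) ""
        = conv.reverse[ku.1]'hk' := by
      simp [pysem]
      rw [List.getElem?_eq_getElem (show conv.length - 1 - ku.1 < conv.length by omega)]
      simp
    rw [hget]
    rw [List.reverse_append]
    simp [htake]
  · rw [if_neg hcase]
    by_cases hlt : ku.1 < conv.length
    · have hk' : ku.1 < conv.reverse.length := by simpa using hlt
      rw [List.drop_eq_getElem_cons hk']
      rw [show (match conv.reverse[ku.1]'hk' :: List.drop (ku.1+1) conv.reverse with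
          | [] => ([] : List String)
          | t :: _ => if 0 < b - ku.2 then [pvTruncB t (b - ku.2)] else [])
        = if 0 < b - ku.2 then [pvTruncB (conv.reverse[ku.1]'hk') (b - ku.2)] else [] from rfl]
      have : ¬ 0 < b - ku.2 := by tauto
      rw [if_neg this]
      simp [htake]
    · have hdrop : conv.reverse.drop ku.1 = [] :=
        List.drop_eq_nil_of_le (by simpa using (by omega : conv.length ≤ ku.1))
      rw [hdrop]
      simp [htake]

-- ===== VERDICT (by name: the statement is the Claim_ definition above) =====
theorem handle_token_limits_spec : Claim_equal_handle_token_limits := by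
  intro conv maxT _
  unfold Spec_handle_token_limits handle_token_limits
  by_cases h0 : maxT ≤ 0
  · unfold handle_token_limits_alt
    simp [h0]
  · rw [if_neg h0, loop_eq_sel, sub_zero, List.nil_append]
    exact sel_reverse conv maxT h0
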